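-- pv_equiv track=rewrite | github.com/absinthe4902/thursday_algo_study | hyebin/week_3/queue6.py | solution
-- ===== SOURCE A (Python) =====
-- def solution(progresses, speeds):
--     answer = []
--
--     while progresses:
--         n = 0
--         for i in range(len(progresses)):
--             progresses[i] += speeds[i]
--
--         for i in range(len(progresses)):
--             if progresses[0] >= 100:
--                 progresses.pop(0)
--                 speeds.pop(0)
--                 n += 1
--         if n >= 1 :
--             answer.append(n)
--     return answer
-- ===== SOURCE B (Python) =====
-- def solution(progresses, speeds):
--     # Single pass: compute the completion day of each task (ceil days, at
--     # least 1) and group consecutive tasks whose day is <= the group leader's.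
--     answer = []
--     cur = 0
--     count = 0
--     for p, s in zip(progresses, speeds):
--         d = max(1, -((p - 100) // s))  # ceil((100 - p) / s), at least 1 day
--         if count and d <= cur:
--             count += 1
--         else:
--             if count:
--                 answer.append(count)
--             cur = d
--             count = 1
--     if count:
--         answer.append(count)
--     return answer
-- ===== Notes on version B (the rewrite author's own statement) =====
-- stated objective: faster
-- what changed: Instead of simulating day by day (adding speeds to every task each day and popping finished fronts), B computes each task's completion day in closed form (ceiling division) and groups consecutive tasks whose day does not exceed the group leader's in a single pass; intended as faster (a timing run saw A time out at n=16 where B returned, so no ratio could be measured).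
-- outside the precondition, e.g. on solution([150], [0]): A returns [1], B raises ZeroDivisionError
import Mathlib
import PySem

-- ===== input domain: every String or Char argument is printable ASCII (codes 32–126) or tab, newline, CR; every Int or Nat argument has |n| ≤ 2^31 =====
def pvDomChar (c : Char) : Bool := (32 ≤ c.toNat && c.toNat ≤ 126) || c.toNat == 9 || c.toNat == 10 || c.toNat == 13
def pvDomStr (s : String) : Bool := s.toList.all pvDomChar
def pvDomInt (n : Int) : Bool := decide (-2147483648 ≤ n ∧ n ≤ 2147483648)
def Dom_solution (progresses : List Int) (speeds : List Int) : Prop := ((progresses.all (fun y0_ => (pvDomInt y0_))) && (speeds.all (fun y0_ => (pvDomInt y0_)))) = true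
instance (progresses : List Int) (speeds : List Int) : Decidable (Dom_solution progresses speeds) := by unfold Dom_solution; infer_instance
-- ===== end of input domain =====

-- B replaces A's day-by-day simulation by a closed-form completion day per task
-- plus a single grouping pass (intended as faster — O(n) instead of one pass per
-- simulated day; in a timing run A timed out at n=16 where B returned, so no
-- speed ratio could be measured).
-- A mutates its arguments in place (pops from both lists); B does not.
-- The equivalence proved here is about the RETURN value only.

-- ===== PORT A =====
-- 'for i in range(len(progresses)): progresses[i] += speeds[i]'
-- (exact when len(speeds) ≥ len(progresses), which Pre_ guarantees; otherwise Python raises IndexError)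
def pyAddSpeeds (pr sp : List Int) : List Int := List.zipWith (· + ·) pr sp

-- the second 'for i in range(len(progresses))' loop: k iterations, each checks the
-- current front and pops from both lists; the [] branch is unreachable in Python
-- (at most one pop per iteration, so the list empties only after the last iteration).
def popPhase : Nat → List Int → List Int → List Int × List Int × Int
  | 0, pr, sp => (pr, sp, 0)
  | k+1, pr, sp =>
    match pr with
    | [] => (pr, sp, 0)
    | p :: prt =>
      if 100 ≤ p then
        let res := popPhase k prt sp.tail
        (res.1, res.2.1, res.2.2 + 1)
      else
        popPhase k (p :: prt) sp

-- the 'while progresses:' loop; the fuel argument only makes the recursion total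
-- (under Pre_ the loop always ends before the fuel runs out, see lemma fuel_enough).
def whileLoop : Nat → List Int → List Int → List Int → List Int
  | 0, _, _, ans => ans
  | f+1, pr, sp, ans =>
    if pr = [] then ans
    else
      let pr1 := pyAddSpeeds pr sp
      let res := popPhase pr1.length pr1 sp
      whileLoop f res.1 res.2.1 (if 1 ≤ res.2.2 then ans ++ [res.2.2] else ans)

def solution (progresses : List Int) (speeds : List Int) : List Int :=
  whileLoop ((progresses.map (fun p => (100 - p).toNat)).sum + progresses.length + 1)
    progresses speeds []

-- ===== PORT B =====
-- d = max(1, -((p - 100) // s)) : completion day of a task (ceiling division)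
def bDay (p s : Int) : Int := max 1 (-(PySem.Int.floordiv (p - 100) s))

-- loop body of Source B: state (cur, count, answer)
def bStep : Int × Int × List Int → Int × Int → Int × Int × List Int
  | (cur, count, ans), (p, s) =>
    let d := bDay p s
    if 1 ≤ count ∧ d ≤ cur then (cur, count + 1, ans)
    else (d, 1, if 1 ≤ count then ans ++ [count] else ans)

def solution_alt (progresses : List Int) (speeds : List Int) : List Int :=
  let st := (progresses.zip speeds).foldl bStep (0, 0, [])
  if 1 ≤ st.2.1 then st.2.2 ++ [st.2.1] else st.2.2

-- ===== PRECONDITION & SPEC =====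
-- Pre_ excludes: speeds shorter than progresses (A raises IndexError in the update
-- loop), and non-positive speeds paired with a task (A then loops forever unless the
-- task already has progress ≥ 100, in which case A returns but B's ceiling division
-- divides by zero — see cites).
def Pre_solution (progresses : List Int) (speeds : List Int) : Prop :=
  progresses.length ≤ speeds.length ∧ ∀ q ∈ progresses.zip speeds, 1 ≤ q.2
instance (progresses : List Int) (speeds : List Int) : Decidable (Pre_solution progresses speeds) := by
  unfold Pre_solution; infer_instance

def pvWitness_solution : List Int × List Int := ([93, 30, 55], [1, 30, 5])

def Spec_solution (progresses : List Int) (speeds : List Int) (out : List Int) : Prop := out = solution_alt progresses speeds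
instance (progresses : List Int) (speeds : List Int) (out : List Int) : Decidable (Spec_solution progresses speeds out) := by unfold Spec_solution; infer_instance

-- ===== CLAIM (what is proved, stated in full; the proofs are below) =====
def Claim_equal_solution : Prop := ∀ (progresses : List Int) (speeds : List Int), Dom_solution progresses speeds → Pre_solution progresses speeds → Spec_solution progresses speeds (solution progresses speeds)

-- ===== LEMMAS AND PROOFS =====

def rr (p s : Int) : Int := -(PySem.Int.floordiv (p - 100) s)
lemma rr_sub (p s : Int) (hs : 1 ≤ s) : rr (p + s) s = rr p s - 1 := by
  unfold rr
  rw [PySem.Int.floordiv_eq_ediv_of_pos (show (0:Int) < s by omega), PySem.Int.floordiv_eq_ediv_of_pos (show (0:Int) < s by omega)]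
  have h : p + s - 100 = (p - 100) + 1 * s := by ring
  rw [h, Int.add_mul_ediv_right _ _ (by omega : s ≠ 0)]
  ring
lemma rr_nonpos_iff (p s : Int) (hs : 1 ≤ s) : rr p s ≤ 0 ↔ 100 ≤ p := by
  unfold rr
  have h := PySem.Int.le_floordiv_iff_mul_le (a := p - 100) (b := s) (q := 0) (show (0:Int) < s by omega)
  constructor
  · intro hle
    have : 0 ≤ PySem.Int.floordiv (p - 100) s := by omega
    have := h.mp this; omega
  · intro hp
    have : (0 : Int) * s ≤ p - 100 := by omega
    have := h.mpr this; omega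
lemma rr_fuel (p s : Int) (hs : 1 ≤ s) : (max 1 (rr p s)).toNat ≤ (100 - p).toNat + 1 := by
  rcases le_or_gt 100 p with hp | hp
  · have := (rr_nonpos_iff p s hs).mpr hp; omega
  · have : rr p s ≤ 100 - p := by
      unfold rr
      have h := PySem.Int.le_floordiv_iff_mul_le (a := p - 100) (b := s) (q := p - 100) (show (0:Int) < s by omega)
      have : (p - 100) * s ≤ p - 100 := by nlinarith
      have := h.mpr this; omega
    omega
def dayL (pr sp : List Int) : List Int := (pr.zip sp).map (fun q => rr q.1 q.2)

lemma dayL_add : ∀ (pr sp : List Int), (∀ q ∈ pr.zip sp, 1 ≤ q.2) →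
    dayL (pyAddSpeeds pr sp) sp = (dayL pr sp).map (· - 1) := by
  intro pr
  induction pr with
  | nil => intro sp _; simp [dayL, pyAddSpeeds]
  | cons p prt ih =>
    intro sp hs
    cases sp with
    | nil => simp [dayL, pyAddSpeeds]
    | cons s spt =>
      have hs1 : 1 ≤ s := hs (p, s) (by simp)
      have := ih spt (fun q hq => hs q (by simp [hq]))
      simp only [pyAddSpeeds, List.zipWith_cons_cons, dayL, List.zip_cons_cons, List.map_cons] at *
      rw [this]
      simp [rr_sub p s hs1]

lemma hs_add : ∀ (pr sp : List Int), (∀ q ∈ pr.zip sp, 1 ≤ q.2) →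
    ∀ q ∈ (pyAddSpeeds pr sp).zip sp, 1 ≤ q.2 := by
  intro pr
  induction pr with
  | nil => intro sp _ q hq; simp [pyAddSpeeds] at hq
  | cons p prt ih =>
    intro sp hs q hq
    cases sp with
    | nil => simp [pyAddSpeeds] at hq
    | cons s spt =>
      simp only [pyAddSpeeds, List.zipWith_cons_cons, List.zip_cons_cons, List.mem_cons] at hq
      rcases hq with h | h
      · subst h; exact hs (p, s) (by simp)
      · exact ih spt (fun q hq => hs q (by simp [hq])) q h
lemma popPhase_stuck (p : Int) (hp : ¬ 100 ≤ p) : ∀ (k : Nat) (prt sp : List Int),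
    popPhase k (p :: prt) sp = (p :: prt, sp, 0) := by
  intro k
  induction k with
  | zero => intro prt sp; rfl
  | succ k ih => intro prt sp; simp [popPhase, hp, ih]

lemma popPhase_eq : ∀ (k : Nat) (pr sp : List Int), pr.length ≤ k →
    popPhase k pr sp =
      (pr.dropWhile (fun x => decide (100 ≤ x)),
       sp.drop (pr.takeWhile (fun x => decide (100 ≤ x))).length,
       ((pr.takeWhile (fun x => decide (100 ≤ x))).length : Int)) := by
  intro k
  induction k with
  | zero =>
    intro pr sp h
    have : pr = [] := List.length_eq_zero_iff.mp (Nat.le_zero.mp h)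
    subst this; simp [popPhase]
  | succ k ih =>
    intro pr sp h
    cases pr with
    | nil => simp [popPhase]
    | cons p prt =>
      by_cases hp : 100 ≤ p
      · have := ih prt sp.tail (by simpa using Nat.le_of_succ_le_succ h)
        simp only [popPhase, hp, if_pos]
        rw [this]
        simp [hp, List.drop_tail]
      · rw [popPhase_stuck p hp]
        simp [hp]
lemma take_corr : ∀ (pr sp : List Int), pr.length ≤ sp.length → (∀ q ∈ pr.zip sp, 1 ≤ q.2) →
    (pr.takeWhile (fun x => decide (100 ≤ x))).length
      = ((dayL pr sp).takeWhile (fun r => decide (r ≤ 0))).length := by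
  intro pr
  induction pr with
  | nil => intro sp _ _; simp [dayL]
  | cons p prt ih =>
    intro sp hl hs
    cases sp with
    | nil => exact absurd hl (by simp)
    | cons s spt =>
      have hs1 : 1 ≤ s := hs (p, s) (by simp)
      have hiff := rr_nonpos_iff p s hs1
      simp only [dayL, List.zip_cons_cons, List.map_cons, List.takeWhile_cons]
      by_cases hp : 100 ≤ p
      · have hr : rr p s ≤ 0 := hiff.mpr hp
        simp only [hp, hr, decide_true, if_true, List.length_cons]
        rw [show (List.map (fun q : Int × Int => rr q.1 q.2) (prt.zip spt)) = dayL prt spt from rfl,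
            ih spt (by simpa using hl) (fun q hq => hs q (by simp [hq]))]
      · have hr : ¬ rr p s ≤ 0 := fun h => hp (hiff.mp h)
        simp [hp, hr]

lemma zip_drop : ∀ (n : Nat) (pr sp : List Int), (pr.drop n).zip (sp.drop n) = (pr.zip sp).drop n := by
  intro n
  induction n with
  | zero => simp
  | succ n ih =>
    intro pr sp
    cases pr with
    | nil => simp
    | cons p prt =>
      cases sp with
      | nil => simp
      | cons s spt => simpa using ih prt spt

lemma dropWhile_eq_drop (l : List Int) (P : Int → Bool) :
    l.dropWhile P = l.drop (l.takeWhile P).length := by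
  induction l with
  | nil => simp
  | cons x xs ih =>
    by_cases hx : P x
    · simp [hx, ih]
    · simp [hx]
def groupsA : Int → List Int → List Int
  | _, [] => []
  | t, r :: rs =>
    ((rs.takeWhile (fun x => decide (x ≤ max (t+1) r))).length + 1 : Int)
      :: groupsA (max (t+1) r) (rs.dropWhile (fun x => decide (x ≤ max (t+1) r)))
termination_by _ l => l.length
decreasing_by
  simpa using Nat.lt_succ_of_le (List.length_dropWhile_le _ _)

lemma groupsA_shift_aux : ∀ (n : Nat) (ds : List Int), ds.length ≤ n → ∀ (t c : Int),
    groupsA (t - c) (ds.map (· - c)) = groupsA t ds := by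
  intro n
  induction n with
  | zero =>
    intro ds h t c
    have : ds = [] := List.length_eq_zero_iff.mp (Nat.le_zero.mp h)
    subst this; simp [groupsA]
  | succ n ih =>
    intro ds h t c
    cases ds with
    | nil => simp [groupsA]
    | cons r rs =>
      simp only [List.map_cons, groupsA]
      have hmax : max (t - c + 1) (r - c) = max (t+1) r - c := by omega
      have hpred : ((fun x => decide (x ≤ max (t - c + 1) (r - c))) ∘ (· - c))
          = (fun x : Int => decide (x ≤ max (t+1) r)) := by
        funext x; simp [hmax]
      rw [List.takeWhile_map, List.dropWhile_map, hpred, hmax]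
      simp only [List.length_map]
      congr 1
      exact ih _ (le_trans (List.length_dropWhile_le _ _) (by simpa using h)) _ _

lemma groupsA_shift (ds : List Int) (t c : Int) :
    groupsA (t - c) (ds.map (· - c)) = groupsA t ds :=
  groupsA_shift_aux ds.length ds le_rfl t c

lemma groupsA_head2 (r : Int) (rs : List Int) (hr : 2 ≤ r) :
    groupsA 1 (r :: rs) = groupsA 0 (r :: rs) := by
  have h : max (1+1 : Int) r = max (0+1) r := by omega
  simp only [groupsA, h]
def gFuel (ds : List Int) : Nat := (ds.map (fun r => (max 1 r).toNat)).sum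

lemma gFuel_cons (r : Int) (rs : List Int) : gFuel (r :: rs) = (max 1 r).toNat + gFuel rs := by
  simp [gFuel]

lemma gFuel_map_sub_le (ds : List Int) : gFuel (ds.map (· - 1)) ≤ gFuel ds := by
  induction ds with
  | nil => simp [gFuel]
  | cons r rs ih =>
    simp only [List.map_cons, gFuel_cons]
    have : (max 1 (r - 1)).toNat ≤ (max 1 r).toNat := by omega
    omega

lemma gFuel_append (a b : List Int) : gFuel (a ++ b) = gFuel a + gFuel b := by
  simp [gFuel]

lemma gFuel_pos (l : List Int) (h : l ≠ []) : 1 ≤ gFuel l := by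
  cases l with
  | nil => exact absurd rfl h
  | cons r rs => rw [gFuel_cons]; omega

lemma len_tw (l : List Int) (P : Int → Bool) :
    (l.takeWhile P).length + (l.dropWhile P).length = l.length := by
  conv_rhs => rw [← List.takeWhile_append_dropWhile (p := P) (l := l)]
  rw [List.length_append]

lemma fuel_enough : ∀ (pr sp : List Int), pr.length ≤ sp.length → (∀ q ∈ pr.zip sp, 1 ≤ q.2) →
    gFuel (dayL pr sp) < (pr.map (fun p => (100 - p).toNat)).sum + pr.length + 1 := by
  intro pr
  induction pr with
  | nil => intro sp _ _; simp [gFuel, dayL]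
  | cons p prt ih =>
    intro sp hl hs
    cases sp with
    | nil => exact absurd hl (by simp)
    | cons s spt =>
      have hs1 : 1 ≤ s := hs (p, s) (by simp)
      have h1 := rr_fuel p s hs1
      have h2 := ih spt (by simpa using hl) (fun q hq => hs q (by simp [hq]))
      simp only [dayL, List.zip_cons_cons, List.map_cons, gFuel_cons, List.sum_cons,
        List.length_cons] at *
      omega
lemma predZW : ((fun r : Int => decide (r ≤ 0)) ∘ (· - 1)) = (fun r : Int => decide (r ≤ 1)) := by
  funext x; simp

lemma whileLoop_eq : ∀ (fuel : Nat) (pr sp ans : List Int),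
    pr.length ≤ sp.length → (∀ q ∈ pr.zip sp, 1 ≤ q.2) →
    gFuel (dayL pr sp) < fuel →
    whileLoop fuel pr sp ans = ans ++ groupsA 0 (dayL pr sp) := by
  intro fuel
  induction fuel with
  | zero => intro pr sp ans _ _ hf; omega
  | succ f ih =>
    intro pr sp ans hl hs hf
    cases pr with
    | nil => simp [whileLoop, dayL, groupsA]
    | cons p prt =>
    cases sp with
    | nil => exact absurd hl (by simp)
    | cons s spt =>
    -- names
    have hds : dayL (p :: prt) (s :: spt) = rr p s :: dayL prt spt := by simp [dayL]
    have hl1 : (pyAddSpeeds (p :: prt) (s :: spt)).length ≤ (s :: spt).length := by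
      simp [pyAddSpeeds, List.length_zipWith]
    have hs1 := hs_add (p :: prt) (s :: spt) hs
    have hd1 : dayL (pyAddSpeeds (p :: prt) (s :: spt)) (s :: spt)
        = (dayL (p :: prt) (s :: spt)).map (· - 1) := dayL_add _ _ hs
    have hpop := popPhase_eq (pyAddSpeeds (p :: prt) (s :: spt)).length
      (pyAddSpeeds (p :: prt) (s :: spt)) (s :: spt) le_rfl
    have hmcorr := take_corr _ _ hl1 hs1
    -- unfold one loop iteration
    have hstep : whileLoop (f+1) (p :: prt) (s :: spt) ans
        = whileLoop f
            ((pyAddSpeeds (p :: prt) (s :: spt)).dropWhile (fun x => decide (100 ≤ x)))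
            ((s :: spt).drop ((pyAddSpeeds (p :: prt) (s :: spt)).takeWhile (fun x => decide (100 ≤ x))).length)
            (if 1 ≤ (((pyAddSpeeds (p :: prt) (s :: spt)).takeWhile (fun x => decide (100 ≤ x))).length : Int)
              then ans ++ [(((pyAddSpeeds (p :: prt) (s :: spt)).takeWhile (fun x => decide (100 ≤ x))).length : Int)]
              else ans) := by
      simp only [whileLoop]
      rw [if_neg (by simp), hpop]
    rw [hstep]
    rcases Nat.eq_zero_or_pos (((pyAddSpeeds (p :: prt) (s :: spt)).takeWhile (fun x => decide (100 ≤ x))).length) with hm | hm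
    · -- no task finished this day
      have htwnil : ((dayL (pyAddSpeeds (p :: prt) (s :: spt)) (s :: spt)).takeWhile (fun r => decide (r ≤ 0))) = [] :=
        List.length_eq_zero_iff.mp (by omega)
      have hdropall : (pyAddSpeeds (p :: prt) (s :: spt)).dropWhile (fun x => decide (100 ≤ x))
          = pyAddSpeeds (p :: prt) (s :: spt) := by
        rw [dropWhile_eq_drop, hm, List.drop_zero]
      -- front day is at least 2
      have hX : (dayL (p :: prt) (s :: spt)).map (· - 1) = (rr p s - 1) :: (dayL prt spt).map (· - 1) := by
        rw [hds]; simp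
      have hr2 : 2 ≤ rr p s := by
        by_contra hcon
        have : decide ((rr p s - 1) ≤ 0) = true := by simp; omega
        rw [hd1, hX, List.takeWhile_cons, this] at htwnil
        simp at htwnil
      -- fuel decreases
      have hfuel1 : gFuel (dayL (pyAddSpeeds (p :: prt) (s :: spt)) (s :: spt)) < f := by
        rw [hd1, hX]
        have h1 := gFuel_map_sub_le (dayL prt spt)
        rw [hds, gFuel_cons] at hf
        rw [gFuel_cons]
        have : (max 1 (rr p s - 1)).toNat + 1 ≤ (max 1 (rr p s)).toNat := by omega
        omega
      rw [hm, hdropall]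
      simp only [Nat.cast_zero, List.drop_zero]
      rw [if_neg (by omega)]
      rw [ih _ _ _ hl1 hs1 hfuel1, hd1]
      have hsh := groupsA_shift (dayL (p :: prt) (s :: spt)) 1 1
      norm_num at hsh
      rw [hsh, hds, groupsA_head2 _ _ hr2]
    · -- a group of hm tasks finished this day
      have hXmap : dayL (pyAddSpeeds (p :: prt) (s :: spt)) (s :: spt)
          = ((p :: prt).zip (s :: spt) |>.map (fun q => rr q.1 q.2)).map (· - 1) := by
        rw [hd1]; rfl
      -- takeWhile on the day side via the un-decremented days
      have htwmap : (dayL (pyAddSpeeds (p :: prt) (s :: spt)) (s :: spt)).takeWhile (fun r => decide (r ≤ 0))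
          = ((dayL (p :: prt) (s :: spt)).takeWhile (fun r => decide (r ≤ 1))).map (· - 1) := by
        rw [hd1, List.takeWhile_map, predZW]
      have hdwmap : (dayL (pyAddSpeeds (p :: prt) (s :: spt)) (s :: spt)).dropWhile (fun r => decide (r ≤ 0))
          = ((dayL (p :: prt) (s :: spt)).dropWhile (fun r => decide (r ≤ 1))).map (· - 1) := by
        rw [hd1, List.dropWhile_map, predZW]
      -- the front finishes today
      have hr1 : rr p s ≤ 1 := by
        by_contra hcon
        have hz : decide (rr p s ≤ 1) = false := by
          simp only [decide_eq_false_iff_not]; omega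
        rw [htwmap, hds, List.takeWhile_cons, hz] at hmcorr
        simp only [Bool.false_eq_true, if_false, List.map_nil, List.length_nil] at hmcorr
        omega
      have htwcons : (dayL (p :: prt) (s :: spt)).takeWhile (fun r => decide (r ≤ 1))
          = rr p s :: (dayL prt spt).takeWhile (fun r => decide (r ≤ 1)) := by
        rw [hds, List.takeWhile_cons, show decide (rr p s ≤ 1) = true from decide_eq_true hr1]
        simp
      have hdwcons : (dayL (p :: prt) (s :: spt)).dropWhile (fun r => decide (r ≤ 1))
          = (dayL prt spt).dropWhile (fun r => decide (r ≤ 1)) := by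
        rw [hds, List.dropWhile_cons, show decide (rr p s ≤ 1) = true from decide_eq_true hr1]
        simp
      have hmval : ((pyAddSpeeds (p :: prt) (s :: spt)).takeWhile (fun x => decide (100 ≤ x))).length
          = ((dayL prt spt).takeWhile (fun r => decide (r ≤ 1))).length + 1 := by
        rw [hmcorr, htwmap, List.length_map, htwcons]; simp
      -- new state facts
      have hpr2 : (pyAddSpeeds (p :: prt) (s :: spt)).dropWhile (fun x => decide (100 ≤ x))
          = (pyAddSpeeds (p :: prt) (s :: spt)).drop
              (((pyAddSpeeds (p :: prt) (s :: spt)).takeWhile (fun x => decide (100 ≤ x))).length) :=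
        dropWhile_eq_drop _ _
      have hlen := len_tw (pyAddSpeeds (p :: prt) (s :: spt)) (fun x => decide (100 ≤ x))
      have hl2 : ((pyAddSpeeds (p :: prt) (s :: spt)).dropWhile (fun x => decide (100 ≤ x))).length
          ≤ ((s :: spt).drop (((pyAddSpeeds (p :: prt) (s :: spt)).takeWhile (fun x => decide (100 ≤ x))).length)).length := by
        rw [hpr2, List.length_drop, List.length_drop]; omega
      have hs2 : ∀ q ∈ ((pyAddSpeeds (p :: prt) (s :: spt)).dropWhile (fun x => decide (100 ≤ x))).zip
          ((s :: spt).drop (((pyAddSpeeds (p :: prt) (s :: spt)).takeWhile (fun x => decide (100 ≤ x))).length)), 1 ≤ q.2 := by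
        intro q hq
        rw [hpr2, zip_drop] at hq
        exact hs1 q (List.mem_of_mem_drop hq)
      have hd2 : dayL ((pyAddSpeeds (p :: prt) (s :: spt)).dropWhile (fun x => decide (100 ≤ x)))
          ((s :: spt).drop (((pyAddSpeeds (p :: prt) (s :: spt)).takeWhile (fun x => decide (100 ≤ x))).length))
          = (dayL (pyAddSpeeds (p :: prt) (s :: spt)) (s :: spt)).dropWhile (fun r => decide (r ≤ 0)) := by
        rw [hpr2]
        unfold dayL
        rw [zip_drop, List.map_drop]
        rw [show List.map (fun q : Int × Int => rr q.1 q.2) ((pyAddSpeeds (p :: prt) (s :: spt)).zip (s :: spt))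
              = dayL (pyAddSpeeds (p :: prt) (s :: spt)) (s :: spt) from rfl]
        rw [dropWhile_eq_drop _ (fun r => decide (r ≤ 0)), hmcorr]
      -- fuel decreases
      have hfuel2 : gFuel (dayL ((pyAddSpeeds (p :: prt) (s :: spt)).dropWhile (fun x => decide (100 ≤ x)))
          ((s :: spt).drop (((pyAddSpeeds (p :: prt) (s :: spt)).takeWhile (fun x => decide (100 ≤ x))).length))) < f := by
        rw [hd2]
        have hsplit := gFuel_append ((dayL (pyAddSpeeds (p :: prt) (s :: spt)) (s :: spt)).takeWhile (fun r => decide (r ≤ 0)))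
          ((dayL (pyAddSpeeds (p :: prt) (s :: spt)) (s :: spt)).dropWhile (fun r => decide (r ≤ 0)))
        rw [List.takeWhile_append_dropWhile] at hsplit
        have htkpos : 1 ≤ gFuel ((dayL (pyAddSpeeds (p :: prt) (s :: spt)) (s :: spt)).takeWhile (fun r => decide (r ≤ 0))) := by
          apply gFuel_pos
          intro hnil
          rw [hnil] at hmcorr
          simp only [List.length_nil] at hmcorr
          omega
        have hle : gFuel (dayL (pyAddSpeeds (p :: prt) (s :: spt)) (s :: spt)) ≤ gFuel (dayL (p :: prt) (s :: spt)) := by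
          rw [hd1]; exact gFuel_map_sub_le _
        omega
      rw [if_pos (by exact_mod_cast hm)]
      rw [ih _ _ _ hl2 hs2 hfuel2]
      -- now compute the grouping of the original day list
      have hmax : max ((0:Int)+1) (rr p s) = 1 := by omega
      rw [hds, hd2, hdwmap, hdwcons]
      simp only [groupsA, hmax]
      have hsh := groupsA_shift ((dayL prt spt).dropWhile (fun r => decide (r ≤ 1))) 1 1
      norm_num at hsh
      rw [hsh, hmval]
      simp [List.append_assoc]

lemma bDay_rr (p s : Int) : bDay p s = max 1 (rr p s) := rfl

lemma fold_eq : ∀ (qs : List (Int × Int)) (cur count : Int) (ans : List Int),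
    1 ≤ cur → 1 ≤ count →
    (let st := qs.foldl bStep (cur, count, ans);
      if 1 ≤ st.2.1 then st.2.2 ++ [st.2.1] else st.2.2)
    = ans ++ ((count + ((qs.map (fun q => rr q.1 q.2)).takeWhile (fun x => decide (x ≤ cur))).length : Int)
        :: groupsA cur ((qs.map (fun q => rr q.1 q.2)).dropWhile (fun x => decide (x ≤ cur)))) := by
  intro qs
  induction qs with
  | nil =>
    intro cur count ans hcur hcount
    simp only [List.foldl_nil, List.map_nil, List.takeWhile_nil, List.dropWhile_nil,
      List.length_nil, groupsA]
    rw [if_pos hcount]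
    simp
  | cons q qs ih =>
    intro cur count ans hcur hcount
    by_cases hd : bDay q.1 q.2 ≤ cur
    · have hr : decide (rr q.1 q.2 ≤ cur) = true := by
        rw [bDay_rr] at hd; simp; omega
      have hb : bStep (cur, count, ans) q = (cur, count + 1, ans) := by
        obtain ⟨q1, q2⟩ := q
        simp only [bStep]
        rw [if_pos ⟨hcount, hd⟩]
      simp only [List.foldl_cons, hb]
      rw [ih cur (count + 1) ans hcur (by omega)]
      simp only [List.map_cons, List.takeWhile_cons, List.dropWhile_cons, hr, if_pos,
        List.length_cons]
      congr 2
      push_cast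
      ring
    · have hgt : cur < rr q.1 q.2 := by rw [bDay_rr] at hd; omega
      have hd2 : bDay q.1 q.2 = rr q.1 q.2 := by rw [bDay_rr]; omega
      have hr : decide (rr q.1 q.2 ≤ cur) = false := by simp; omega
      have hb : bStep (cur, count, ans) q = (bDay q.1 q.2, 1, ans ++ [count]) := by
        obtain ⟨q1, q2⟩ := q
        simp only [bStep]
        rw [if_neg (by rw [not_and_or]; right; exact hd), if_pos hcount]
      simp only [List.foldl_cons, hb]
      rw [ih (bDay q.1 q.2) 1 (ans ++ [count]) (by rw [bDay_rr]; exact le_max_left _ _) le_rfl]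
      simp only [List.map_cons, List.takeWhile_cons, List.dropWhile_cons, hr]
      simp only [Bool.false_eq_true, if_false, List.length_nil]
      have hmax : max (cur + 1) (rr q.1 q.2) = rr q.1 q.2 := by omega
      simp only [groupsA, hmax, hd2, List.append_assoc, List.cons_append, List.nil_append]
      rw [add_comm]
      norm_num

lemma alt_eq (pr sp : List Int) : solution_alt pr sp = groupsA 0 (dayL pr sp) := by
  unfold solution_alt dayL
  cases hq : pr.zip sp with
  | nil => simp [groupsA]
  | cons q qs =>
    have hb : bStep (0, 0, []) q = (bDay q.1 q.2, 1, []) := by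
      obtain ⟨q1, q2⟩ := q
      simp [bStep]
    simp only [List.foldl_cons, hb]
    rw [fold_eq qs (bDay q.1 q.2) 1 [] (by rw [bDay_rr]; exact le_max_left _ _) le_rfl]
    have hmax : max ((0:Int) + 1) (rr q.1 q.2) = bDay q.1 q.2 := by rw [bDay_rr]; omega
    simp only [List.map_cons, groupsA, hmax, List.nil_append]
    rw [add_comm]

-- ===== VERDICT (by name: the statement is the Claim_ definition above) =====
theorem solution_spec : Claim_equal_solution := by
  intro pr sp _ hpre
  unfold Spec_solution
  rw [alt_eq, solution, whileLoop_eq _ _ _ _ hpre.1 hpre.2 (fuel_enough _ _ hpre.1 hpre.2)]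
  simp
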